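-- pv_equiv track=rewrite | github.com/KazukiNoSuzaku/Leetcode | Python/2334_Subarray_With_Elements_Greater_Than_Varying_Threshold.py | validSubarraySize
-- ===== SOURCE A (Python) =====
-- def validSubarraySize(nums, threshold):
--     """
--     :type nums: List[int]
--     :type threshold: int
--     :rtype: int
--     """
--     n = len(nums)
--     # For each element as the minimum, find the widest subarray where it is minimum
--     # using monotonic stack to find left and right boundaries
--     left = [-1] * n   # index of nearest smaller element to the left
--     right = [n] * n   # index of nearest smaller element to the right
--
--     stack = []
--     for i in range(n):
--         while stack and nums[stack[-1]] >= nums[i]: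
--             stack.pop()
--         left[i] = stack[-1] if stack else -1
--         stack.append(i)
--
--     stack = []
--     for i in range(n - 1, -1, -1):
--         while stack and nums[stack[-1]] >= nums[i]:
--             stack.pop()
--         right[i] = stack[-1] if stack else n
--         stack.append(i)
--
--     for i in range(n):
--         # subarray length where nums[i] is minimum
--         length = right[i] - left[i] - 1
--         if nums[i] > threshold // length:
--             # check exact condition: nums[i] > threshold / length
--             if nums[i] * length > threshold:
--                 return length
--
--     return -1
-- ===== SOURCE B (Python) =====
-- def validSubarraySize(nums, threshold):
--     """
--     :type nums: List[int]
--     :type threshold: int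
--     :rtype: int
--     """
--     n = len(nums)
--     for i in range(n):
--         x = nums[i]
--         l = i
--         while l > 0 and nums[l - 1] >= x:
--             l -= 1
--         r = i
--         while r + 1 < n and nums[r + 1] >= x:
--             r += 1
--         length = r - l + 1
--         if x * length > threshold:
--             return length
--     return -1
-- ===== Notes on version B (the rewrite author's own statement) =====
-- stated objective: simpler
-- what changed: Replaces the two monotonic-stack passes and the length arrays by a direct per-index two-sided scan that expands the span of elements >= nums[i] around i, and collapses A's redundant floor-division pre-check into the single exact test nums[i]*length > threshold.
import Mathlib
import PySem

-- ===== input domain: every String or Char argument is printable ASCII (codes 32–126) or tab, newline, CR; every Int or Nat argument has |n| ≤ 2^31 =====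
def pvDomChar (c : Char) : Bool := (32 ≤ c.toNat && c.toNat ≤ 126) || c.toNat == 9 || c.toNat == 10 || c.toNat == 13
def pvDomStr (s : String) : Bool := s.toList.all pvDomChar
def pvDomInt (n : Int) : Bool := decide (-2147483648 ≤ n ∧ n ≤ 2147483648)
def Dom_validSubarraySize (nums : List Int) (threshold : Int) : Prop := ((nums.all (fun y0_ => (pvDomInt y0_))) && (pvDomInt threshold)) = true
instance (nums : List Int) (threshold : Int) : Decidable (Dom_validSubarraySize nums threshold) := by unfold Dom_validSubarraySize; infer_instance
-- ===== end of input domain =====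

-- B replaces A's two monotonic-stack passes by a direct per-index two-sided scan of the
-- span of elements ≥ nums[i] around i (simpler, no stacks/arrays; not faster).

-- ===== PORT A =====
-- 'while stack and nums[stack[-1]] >= nums[i]: stack.pop()'  (stack head = Python stack top)
def pvPop (nums : List Int) (x : Int) : List Nat → List Nat
  | [] => []
  | t :: s => if nums.getD t 0 ≥ x then pvPop nums x s else t :: s

-- 'stack[-1] if stack else d'
def pvTop (d : Int) (s : List Nat) : Int :=
  match s with
  | [] => d
  | t :: _ => (t : Int)

-- first loop: 'for i in range(n): … left[i] = …; stack.append(i)' (emits left[i] in index order)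
def pvLeftGo (nums : List Int) (stack : List Nat) (i fuel : Nat) : List Int :=
  match fuel with
  | 0 => []
  | fuel' + 1 =>
    let s := pvPop nums (nums.getD i 0) stack
    pvTop (-1) s :: pvLeftGo nums (i :: s) (i + 1) fuel'

-- second loop: 'for i in range(n-1, -1, -1): … right[i] = …' (current index is fuel-1;
-- emits right[i] in processing order, i.e. descending; reversed by the caller)
def pvRightGo (nums : List Int) (n : Nat) (stack : List Nat) (fuel : Nat) : List Int :=
  match fuel with
  | 0 => []
  | i + 1 =>
    let s := pvPop nums (nums.getD i 0) stack
    pvTop (n : Int) s :: pvRightGo nums n (i :: s) i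

-- third loop: 'for i in range(n): length = right[i]-left[i]-1; if nums[i] > threshold // length: if nums[i]*length > threshold: return length'
def pvFind (nums : List Int) (threshold : Int) (left right : List Int) (i fuel : Nat) : Int :=
  match fuel with
  | 0 => -1
  | fuel' + 1 =>
    let len := right.getD i 0 - left.getD i 0 - 1
    if nums.getD i 0 > PySem.Int.floordiv threshold len then
      if nums.getD i 0 * len > threshold then len
      else pvFind nums threshold left right (i + 1) fuel'
    else pvFind nums threshold left right (i + 1) fuel'

def validSubarraySize (nums : List Int) (threshold : Int) : Int :=
  let n := nums.length
  pvFind nums threshold (pvLeftGo nums [] 0 n) ((pvRightGo nums n [] n).reverse) 0 n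

-- ===== PORT B =====
-- 'l = i; while l > 0 and nums[l-1] >= x: l -= 1'
def pvScanL (nums : List Int) (x : Int) : Nat → Nat
  | 0 => 0
  | m + 1 => if nums.getD m 0 ≥ x then pvScanL nums x m else m + 1

-- 'r = i; while r + 1 < n and nums[r+1] >= x: r += 1'
def pvScanR (nums : List Int) (x : Int) (r : Nat) : Nat :=
  if _h : r + 1 < nums.length then
    if nums.getD (r + 1) 0 ≥ x then pvScanR nums x (r + 1) else r
  else r
termination_by nums.length - r

-- 'for i in range(n): … if x * length > threshold: return length'
def pvGoB (nums : List Int) (threshold : Int) (i fuel : Nat) : Int :=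
  match fuel with
  | 0 => -1
  | fuel' + 1 =>
    let x := nums.getD i 0
    let l := pvScanL nums x i
    let r := pvScanR nums x i
    let len : Int := (r : Int) - (l : Int) + 1
    if x * len > threshold then len else pvGoB nums threshold (i + 1) fuel'

def validSubarraySize_alt (nums : List Int) (threshold : Int) : Int :=
  pvGoB nums threshold 0 nums.length

-- ===== PRECONDITION & SPEC =====
def Spec_validSubarraySize (nums : List Int) (threshold : Int) (out : Int) : Prop := out = validSubarraySize_alt nums threshold
instance (nums : List Int) (threshold : Int) (out : Int) : Decidable (Spec_validSubarraySize nums threshold out) := by unfold Spec_validSubarraySize; infer_instance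

-- ===== CLAIM (what is proved, stated in full; the proofs are below) =====
def Claim_equal_validSubarraySize : Prop := ∀ (nums : List Int) (threshold : Int), Dom_validSubarraySize nums threshold → Spec_validSubarraySize nums threshold (validSubarraySize nums threshold)

-- ===== LEMMAS AND PROOFS =====

-- canonical descriptions of A's stacks: a processed index j survives iff every index
-- strictly between j and the pass's current boundary carries a strictly larger value.
def pvOkL (nums : List Int) (i j : Nat) : Bool :=
  (List.Ico (j + 1) i).all (fun k => decide (nums.getD j 0 < nums.getD k 0))

def pvSL (nums : List Int) (i : Nat) : List Nat :=
  ((List.range i).filter (pvOkL nums i)).reverse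

def pvPL (nums : List Int) (i : Nat) : List Nat :=
  ((List.range i).filter (pvOkL nums (i + 1))).reverse

def pvOkR (nums : List Int) (b j : Nat) : Bool :=
  (List.Ico b j).all (fun k => decide (nums.getD j 0 < nums.getD k 0))

def pvSR (nums : List Int) (n b : Nat) : List Nat :=
  (List.range' b (n - b)).filter (pvOkR nums b)

def pvPR (nums : List Int) (n i : Nat) : List Nat :=
  (List.range' (i + 1) (n - (i + 1))).filter (pvOkR nums i)

-- the value A stores in left[i] / right[i], and the corresponding span endpoints as Nats
def pvAL (nums : List Int) (i : Nat) : Int := pvTop (-1) (pvPL nums i)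
def pvAR (nums : List Int) (n i : Nat) : Int := pvTop (n : Int) (pvPR nums n i)
def pvLA (nums : List Int) (i : Nat) : Nat :=
  match pvPL nums i with | [] => 0 | t :: _ => t + 1
def pvRA (nums : List Int) (n i : Nat) : Nat :=
  match pvPR nums n i with | [] => n - 1 | t :: _ => t - 1

theorem pvPop_eq_filter (nums : List Int) (x : Int) (s : List Nat)
    (h : s.Pairwise (fun a b => nums.getD b 0 < nums.getD a 0)) :
    pvPop nums x s = s.filter (fun j => decide (nums.getD j 0 < x)) := by
  induction s with
  | nil => rfl
  | cons t s ih =>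
    rcases List.pairwise_cons.mp h with ⟨h1, h2⟩
    rw [show pvPop nums x (t :: s) = if nums.getD t 0 ≥ x then pvPop nums x s else t :: s from rfl,
      List.filter_cons]
    by_cases hx : nums.getD t 0 ≥ x
    · rw [if_pos hx, if_neg (by simp only [decide_eq_true_eq]; omega), ih h2]
    · rw [if_neg hx, if_pos (by simp only [decide_eq_true_eq]; omega),
        List.filter_eq_self.mpr (fun a ha => by
          simp only [decide_eq_true_eq]; have := h1 a ha; omega)]

theorem pvOk_mono (nums : List Int) (i : Nat) {a b : Nat} (hab : a < b) (hbi : b < i)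
    (ha : pvOkL nums i a = true) : nums.getD a 0 < nums.getD b 0 := by
  simp only [pvOkL, List.all_eq_true, decide_eq_true_eq] at ha
  exact ha b (List.Ico.mem.mpr ⟨hab, hbi⟩)

theorem pvSL_pairwise (nums : List Int) (i : Nat) :
    (pvSL nums i).Pairwise (fun a b => nums.getD b 0 < nums.getD a 0) := by
  unfold pvSL
  rw [List.pairwise_reverse]
  have h0 : ((List.range i).filter (pvOkL nums i)).Pairwise
      (fun a b => a ∈ (List.range i).filter (pvOkL nums i) ∧
        b ∈ (List.range i).filter (pvOkL nums i) ∧ a < b) :=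
    List.Pairwise.and_mem.mp (List.Pairwise.filter _ List.pairwise_lt_range)
  refine h0.imp ?_
  rintro a b ⟨ha, hb, hab⟩
  rcases List.mem_filter.mp ha with ⟨_, hoka⟩
  rcases List.mem_filter.mp hb with ⟨hbr, _⟩
  exact pvOk_mono nums i hab (List.mem_range.mp hbr) hoka

theorem pvOkR_mono (nums : List Int) (bnd : Nat) {a b : Nat} (hab : a < b) (hba : bnd ≤ a)
    (hb : pvOkR nums bnd b = true) : nums.getD b 0 < nums.getD a 0 := by
  simp only [pvOkR, List.all_eq_true, decide_eq_true_eq] at hb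
  exact hb a (List.Ico.mem.mpr ⟨hba, hab⟩)

theorem pvSR_pairwise (nums : List Int) (n b : Nat) :
    (pvSR nums n b).Pairwise (fun a b' => nums.getD b' 0 < nums.getD a 0) := by
  unfold pvSR
  have h0 : ((List.range' b (n - b)).filter (pvOkR nums b)).Pairwise
      (fun a b' => a ∈ (List.range' b (n - b)).filter (pvOkR nums b) ∧
        b' ∈ (List.range' b (n - b)).filter (pvOkR nums b) ∧ a < b') :=
    List.Pairwise.and_mem.mp (List.Pairwise.filter _ (List.pairwise_lt_range' 1))
  refine h0.imp ?_
  rintro a b' ⟨ha, hb', hab⟩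
  rcases List.mem_filter.mp ha with ⟨har, _⟩
  rcases List.mem_filter.mp hb' with ⟨_, hokb⟩
  exact pvOkR_mono nums b hab (List.mem_range'_1.mp har).1 hokb

theorem pvOkL_succ (nums : List Int) (i j : Nat) (hj : j < i) :
    pvOkL nums (i + 1) j = (pvOkL nums i j && decide (nums.getD j 0 < nums.getD i 0)) := by
  rw [Bool.eq_iff_iff]
  simp only [pvOkL, List.all_eq_true, decide_eq_true_eq, Bool.and_eq_true]
  constructor
  · intro h
    refine ⟨fun k hk => ?_, h i (List.Ico.mem.mpr ⟨by omega, by omega⟩)⟩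
    have hk' := List.Ico.mem.mp hk
    exact h k (List.Ico.mem.mpr ⟨hk'.1, by omega⟩)
  · rintro ⟨h, hi⟩ k hk
    have hk' := List.Ico.mem.mp hk
    by_cases hki : k = i
    · subst hki; exact hi
    · exact h k (List.Ico.mem.mpr ⟨hk'.1, by omega⟩)

theorem pvPopL (nums : List Int) (i : Nat) :
    pvPop nums (nums.getD i 0) (pvSL nums i) = pvPL nums i := by
  rw [pvPop_eq_filter nums _ _ (pvSL_pairwise nums i)]
  unfold pvSL pvPL
  rw [List.filter_reverse, List.filter_filter]
  congr 1
  refine List.filter_congr ?_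
  intro j hj
  rw [pvOkL_succ nums i j (List.mem_range.mp hj), Bool.and_comm]

theorem pvSL_succ (nums : List Int) (i : Nat) :
    i :: pvPL nums i = pvSL nums (i + 1) := by
  unfold pvPL pvSL
  rw [List.range_succ, List.filter_append]
  have : (List.filter (pvOkL nums (i + 1)) [i]) = [i] := by
    simp [pvOkL]
  rw [this, List.reverse_append]
  rfl

theorem pvOkR_at (nums : List Int) (i j : Nat) (hj : i < j) :
    pvOkR nums i j = (pvOkR nums (i + 1) j && decide (nums.getD j 0 < nums.getD i 0)) := by
  rw [Bool.eq_iff_iff]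
  simp only [pvOkR, List.all_eq_true, decide_eq_true_eq, Bool.and_eq_true]
  constructor
  · intro h
    refine ⟨fun k hk => ?_, h i (List.Ico.mem.mpr ⟨le_refl i, hj⟩)⟩
    have hk' := List.Ico.mem.mp hk
    exact h k (List.Ico.mem.mpr ⟨by omega, hk'.2⟩)
  · rintro ⟨h, hi⟩ k hk
    have hk' := List.Ico.mem.mp hk
    by_cases hki : k = i
    · subst hki; exact hi
    · exact h k (List.Ico.mem.mpr ⟨by omega, hk'.2⟩)

theorem pvPopR (nums : List Int) (n i : Nat) :
    pvPop nums (nums.getD i 0) (pvSR nums n (i + 1)) = pvPR nums n i := by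
  rw [pvPop_eq_filter nums _ _ (pvSR_pairwise nums n (i + 1))]
  unfold pvSR pvPR
  rw [List.filter_filter]
  refine List.filter_congr ?_
  intro j hj
  rw [pvOkR_at nums i j (by exact (List.mem_range'_1.mp hj).1), Bool.and_comm]

theorem pvSR_succ (nums : List Int) (n i : Nat) (hi : i < n) :
    i :: pvPR nums n i = pvSR nums n i := by
  unfold pvPR pvSR
  have hn : n - i = (n - (i + 1)) + 1 := by omega
  rw [hn, List.range'_succ, List.filter_cons]
  have : pvOkR nums i i = true := by
    simp [pvOkR]
  rw [if_pos this]

theorem pvSL_zero (nums : List Int) : pvSL nums 0 = [] := by simp [pvSL]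

theorem pvLeftGo_spec (nums : List Int) (fuel : Nat) : ∀ i,
    pvLeftGo nums (pvSL nums i) i fuel = (List.range' i fuel).map (pvAL nums) := by
  induction fuel with
  | zero => intro i; rfl
  | succ fuel ih =>
    intro i
    show pvTop (-1) (pvPop nums (nums.getD i 0) (pvSL nums i))
        :: pvLeftGo nums (i :: pvPop nums (nums.getD i 0) (pvSL nums i)) (i + 1) fuel
      = (List.range' i (fuel + 1)).map (pvAL nums)
    rw [pvPopL, pvSL_succ, List.range'_succ, List.map_cons, ih (i + 1)]
    rfl

theorem pvSR_top (nums : List Int) (n : Nat) : pvSR nums n n = [] := by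
  simp [pvSR]

theorem pvRightGo_spec (nums : List Int) (n : Nat) : ∀ i, i ≤ n →
    pvRightGo nums n (pvSR nums n i) i = ((List.range i).reverse).map (pvAR nums n) := by
  intro i
  induction i with
  | zero => intro _; rfl
  | succ i ih =>
    intro hi
    show pvTop (n : Int) (pvPop nums (nums.getD i 0) (pvSR nums n (i + 1)))
        :: pvRightGo nums n (i :: pvPop nums (nums.getD i 0) (pvSR nums n (i + 1))) i
      = ((List.range (i + 1)).reverse).map (pvAR nums n)
    rw [pvPopR, pvSR_succ nums n i (by omega), List.range_succ, List.reverse_append,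
      ih (by omega)]
    rfl

theorem pvExistsOkL (nums : List Int) (i : Nat) : ∀ d k, i - k = d → k < i →
    nums.getD k 0 < nums.getD i 0 →
    ∃ k', k ≤ k' ∧ k' < i ∧ pvOkL nums (i + 1) k' = true := by
  intro d
  induction d using Nat.strong_induction_on with
  | _ d ih =>
    intro k hd hk hv
    by_cases hall : ∀ m ∈ List.Ico (k + 1) i, nums.getD k 0 < nums.getD m 0
    · refine ⟨k, le_refl k, hk, ?_⟩
      simp only [pvOkL, List.all_eq_true, decide_eq_true_eq]
      intro m hm
      have hm' := List.Ico.mem.mp hm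
      by_cases hmi : m = i
      · subst hmi; exact hv
      · exact hall m (List.Ico.mem.mpr ⟨hm'.1, by omega⟩)
    · push Not at hall
      rcases hall with ⟨m, hm, hmv⟩
      have hm' := List.Ico.mem.mp hm
      rcases ih (i - m) (by omega) m rfl (by omega) (by omega) with ⟨k', h1, h2, h3⟩
      exact ⟨k', by omega, h2, h3⟩

theorem pvExistsOkR (nums : List Int) (i : Nat) : ∀ d k, k - i = d → i < k →
    nums.getD k 0 < nums.getD i 0 →
    ∃ k', i < k' ∧ k' ≤ k ∧ pvOkR nums i k' = true := by
  intro d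
  induction d using Nat.strong_induction_on with
  | _ d ih =>
    intro k hd hk hv
    by_cases hall : ∀ m ∈ List.Ico (i + 1) k, nums.getD k 0 < nums.getD m 0
    · refine ⟨k, hk, le_refl k, ?_⟩
      simp only [pvOkR, List.all_eq_true, decide_eq_true_eq]
      intro m hm
      have hm' := List.Ico.mem.mp hm
      by_cases hmi : m = i
      · subst hmi; exact hv
      · exact hall m (List.Ico.mem.mpr ⟨by omega, hm'.2⟩)
    · push Not at hall
      rcases hall with ⟨m, hm, hmv⟩
      have hm' := List.Ico.mem.mp hm
      rcases ih (m - i) (by omega) m rfl (by omega) (by omega) with ⟨k', h1, h2, h3⟩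
      exact ⟨k', h1, by omega, h3⟩

def pvPropL (nums : List Int) (i l : Nat) : Prop :=
  l ≤ i ∧ (∀ k, l ≤ k → k < i → nums.getD i 0 ≤ nums.getD k 0) ∧
    (l = 0 ∨ nums.getD (l - 1) 0 < nums.getD i 0)

def pvPropR (nums : List Int) (i r : Nat) : Prop :=
  i ≤ r ∧ r < nums.length ∧ (∀ k, i < k → k ≤ r → nums.getD i 0 ≤ nums.getD k 0) ∧
    (r + 1 = nums.length ∨ nums.getD (r + 1) 0 < nums.getD i 0)

theorem pvPL_pairwise_gt (nums : List Int) (i : Nat) :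
    (pvPL nums i).Pairwise (fun a b => b < a) := by
  unfold pvPL
  rw [List.pairwise_reverse]
  exact List.Pairwise.filter _ List.pairwise_lt_range

theorem pvPR_pairwise_lt (nums : List Int) (n i : Nat) :
    (pvPR nums n i).Pairwise (fun a b => a < b) :=
  List.Pairwise.filter _ (List.pairwise_lt_range' 1)

theorem pvMem_pvPL (nums : List Int) (i j : Nat) :
    j ∈ pvPL nums i ↔ (j < i ∧ pvOkL nums (i + 1) j = true) := by
  unfold pvPL
  rw [List.mem_reverse, List.mem_filter, List.mem_range]

theorem pvMem_pvPR (nums : List Int) (n i j : Nat) :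
    j ∈ pvPR nums n i ↔ (i < j ∧ j < n ∧ pvOkR nums i j = true) := by
  unfold pvPR
  rw [List.mem_filter, List.mem_range'_1]
  constructor
  · rintro ⟨⟨h1, h2⟩, h3⟩
    exact ⟨by omega, by omega, h3⟩
  · rintro ⟨h1, h2, h3⟩
    exact ⟨⟨by omega, by omega⟩, h3⟩

theorem pvPropL_unique (nums : List Int) (i l₁ l₂ : Nat)
    (h₁ : pvPropL nums i l₁) (h₂ : pvPropL nums i l₂) : l₁ = l₂ := by
  have key : ∀ a b : Nat, pvPropL nums i a → pvPropL nums i b → a < b → False := by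
    intro a b ha hb hab
    rcases hb.2.2 with h0 | hlt
    · omega
    · have := ha.2.1 (b - 1) (by omega) (by have := hb.1; omega)
      omega
  rcases Nat.lt_trichotomy l₁ l₂ with h | h | h
  · exact absurd (key l₁ l₂ h₁ h₂ h) (fun f => f)
  · exact h
  · exact absurd (key l₂ l₁ h₂ h₁ h) (fun f => f)

theorem pvPropR_unique (nums : List Int) (i r₁ r₂ : Nat)
    (h₁ : pvPropR nums i r₁) (h₂ : pvPropR nums i r₂) : r₁ = r₂ := by
  have key : ∀ a b : Nat, pvPropR nums i a → pvPropR nums i b → a < b → False := by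
    intro a b ha hb hab
    rcases ha.2.2.2 with h0 | hlt
    · have := hb.2.1; omega
    · have := hb.2.2.1 (a + 1) (by have := ha.1; omega) (by omega)
      omega
  rcases Nat.lt_trichotomy r₁ r₂ with h | h | h
  · exact absurd (key r₁ r₂ h₁ h₂ h) (fun f => f)
  · exact h
  · exact absurd (key r₂ r₁ h₂ h₁ h) (fun f => f)

theorem pvScanL_prop (nums : List Int) (i : Nat) : ∀ m, m ≤ i →
    (∀ k, m ≤ k → k < i → nums.getD i 0 ≤ nums.getD k 0) →
    pvPropL nums i (pvScanL nums (nums.getD i 0) m) := by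
  intro m
  induction m with
  | zero =>
    intro _ hyp
    exact ⟨Nat.zero_le i, hyp, Or.inl rfl⟩
  | succ m ih =>
    intro hm hyp
    show pvPropL nums i (if nums.getD m 0 ≥ nums.getD i 0 then pvScanL nums (nums.getD i 0) m
      else m + 1)
    by_cases hx : nums.getD m 0 ≥ nums.getD i 0
    · rw [if_pos hx]
      refine ih (by omega) ?_
      intro k hk1 hk2
      by_cases hkm : k = m
      · subst hkm; exact hx
      · exact hyp k (by omega) hk2
    · rw [if_neg hx]
      refine ⟨hm, hyp, Or.inr ?_⟩
      have hm1 : m + 1 - 1 = m := rfl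
      rw [hm1]
      omega

theorem pvScanR_prop (nums : List Int) (i : Nat) : ∀ d r,
    nums.length - r = d → i ≤ r → r < nums.length →
    (∀ k, i < k → k ≤ r → nums.getD i 0 ≤ nums.getD k 0) →
    pvPropR nums i (pvScanR nums (nums.getD i 0) r) := by
  intro d
  induction d using Nat.strong_induction_on with
  | _ d ih =>
    intro r hd hir hrn hyp
    rw [pvScanR]
    by_cases h1 : r + 1 < nums.length
    · rw [dif_pos h1]
      by_cases hx : nums.getD (r + 1) 0 ≥ nums.getD i 0
      · rw [if_pos hx]
        refine ih (nums.length - (r + 1)) (by omega) (r + 1) rfl (by omega) h1 ?_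
        intro k hk1 hk2
        by_cases hkr : k = r + 1
        · subst hkr; exact hx
        · exact hyp k hk1 (by omega)
      · rw [if_neg hx]
        exact ⟨hir, hrn, hyp, Or.inr (by omega)⟩
    · rw [dif_neg h1]
      exact ⟨hir, hrn, hyp, Or.inl (by omega)⟩

theorem pvLA_prop (nums : List Int) (i : Nat) : pvPropL nums i (pvLA nums i) := by
  rcases hp : pvPL nums i with _ | ⟨t, rest⟩
  · have hz : pvLA nums i = 0 := by unfold pvLA; rw [hp]
    rw [hz]
    refine ⟨Nat.zero_le i, ?_, Or.inl rfl⟩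
    intro k _ hk
    by_contra hv
    rcases pvExistsOkL nums i (i - k) k rfl hk (by omega) with ⟨k', _, hk2, hk3⟩
    have : k' ∈ pvPL nums i := (pvMem_pvPL nums i k').mpr ⟨hk2, hk3⟩
    rw [hp] at this
    exact absurd this (List.not_mem_nil)
  · have hz : pvLA nums i = t + 1 := by unfold pvLA; rw [hp]
    have htm : t ∈ pvPL nums i := by rw [hp]; exact List.mem_cons_self
    rcases (pvMem_pvPL nums i t).mp htm with ⟨hti, htok⟩
    have hmax : ∀ j ∈ pvPL nums i, j ≤ t := by
      intro j hj
      rw [hp] at hj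
      rcases List.mem_cons.mp hj with h | h
      · omega
      · have := pvPL_pairwise_gt nums i
        rw [hp] at this
        have := (List.pairwise_cons.mp this).1 j h
        omega
    rw [hz]
    refine ⟨by omega, ?_, Or.inr ?_⟩
    · intro k hk1 hk2
      by_contra hv
      rcases pvExistsOkL nums i (i - k) k rfl hk2 (by omega) with ⟨k', hk1', hk2', hk3'⟩
      have := hmax k' ((pvMem_pvPL nums i k').mpr ⟨hk2', hk3'⟩)
      omega
    · simp only [pvOkL, List.all_eq_true, decide_eq_true_eq] at htok
      have := htok i (List.Ico.mem.mpr ⟨by omega, by omega⟩)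
      simpa using this

theorem pvRA_prop (nums : List Int) (i : Nat) (hi : i < nums.length) :
    pvPropR nums i (pvRA nums nums.length i) := by
  rcases hp : pvPR nums nums.length i with _ | ⟨t, rest⟩
  · have hz : pvRA nums nums.length i = nums.length - 1 := by unfold pvRA; rw [hp]
    rw [hz]
    refine ⟨by omega, by omega, ?_, Or.inl (by omega)⟩
    intro k hk1 hk2
    by_contra hv
    rcases pvExistsOkR nums i (k - i) k rfl hk1 (by omega) with ⟨k', hk1', hk2', hk3'⟩
    have : k' ∈ pvPR nums nums.length i :=
      (pvMem_pvPR nums nums.length i k').mpr ⟨hk1', by omega, hk3'⟩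
    rw [hp] at this
    exact absurd this (List.not_mem_nil)
  · have hz : pvRA nums nums.length i = t - 1 := by unfold pvRA; rw [hp]
    have htm : t ∈ pvPR nums nums.length i := by rw [hp]; exact List.mem_cons_self
    rcases (pvMem_pvPR nums nums.length i t).mp htm with ⟨hit, htn, htok⟩
    have hmin : ∀ j ∈ pvPR nums nums.length i, t ≤ j := by
      intro j hj
      rw [hp] at hj
      rcases List.mem_cons.mp hj with h | h
      · omega
      · have := pvPR_pairwise_lt nums nums.length i
        rw [hp] at this
        have := (List.pairwise_cons.mp this).1 j h
        omega
    rw [hz]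
    refine ⟨by omega, by omega, ?_, Or.inr ?_⟩
    · intro k hk1 hk2
      by_contra hv
      rcases pvExistsOkR nums i (k - i) k rfl hk1 (by omega) with ⟨k', hk1', hk2', hk3'⟩
      have := hmin k' ((pvMem_pvPR nums nums.length i k').mpr ⟨hk1', by omega, hk3'⟩)
      omega
    · simp only [pvOkR, List.all_eq_true, decide_eq_true_eq] at htok
      have := htok i (List.Ico.mem.mpr ⟨le_refl i, by omega⟩)
      have ht1 : t - 1 + 1 = t := by omega
      rw [ht1]
      exact this

theorem pvScanL_eq (nums : List Int) (i : Nat) :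
    pvScanL nums (nums.getD i 0) i = pvLA nums i :=
  pvPropL_unique nums i _ _
    (pvScanL_prop nums i i (le_refl i) (fun k hk1 hk2 => by omega))
    (pvLA_prop nums i)

theorem pvScanR_eq (nums : List Int) (i : Nat) (hi : i < nums.length) :
    pvScanR nums (nums.getD i 0) i = pvRA nums nums.length i :=
  pvPropR_unique nums i _ _
    (pvScanR_prop nums i (nums.length - i) i rfl (le_refl i) hi
      (fun k hk1 hk2 => by omega))
    (pvRA_prop nums i hi)

theorem pvAL_eq (nums : List Int) (i : Nat) : pvAL nums i = (pvLA nums i : Int) - 1 := by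
  unfold pvAL pvLA
  rcases pvPL nums i with _ | ⟨t, rest⟩
  · rfl
  · show (t : Int) = ((t + 1 : Nat) : Int) - 1
    omega

theorem pvAR_eq (nums : List Int) (i : Nat) (hi : i < nums.length) :
    pvAR nums nums.length i = (pvRA nums nums.length i : Int) + 1 := by
  unfold pvAR pvRA
  rcases hp : pvPR nums nums.length i with _ | ⟨t, rest⟩
  · show ((nums.length : Nat) : Int) = ((nums.length - 1 : Nat) : Int) + 1
    omega
  · have htm : t ∈ pvPR nums nums.length i := by rw [hp]; exact List.mem_cons_self
    have := ((pvMem_pvPR nums nums.length i t).mp htm).1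
    show (t : Int) = ((t - 1 : Nat) : Int) + 1
    omega

theorem pvCondIff (x t len : Int) (h : 1 ≤ len) :
    (x > PySem.Int.floordiv t len) ↔ x * len > t := by
  have := PySem.Int.floordiv_lt_iff_lt_mul (a := t) (b := len) (q := x) (by omega)
  constructor
  · intro hgt; exact this.mp hgt
  · intro hmul; exact this.mpr hmul

theorem pvGetDMapRange (f : Nat → Int) (n i : Nat) (hi : i < n) :
    ((List.range n).map f).getD i 0 = f i := by
  rw [List.getD_eq_getElem?_getD, List.getElem?_map, List.getElem?_range hi]
  rfl

theorem pvFind_eq_goB (nums : List Int) (threshold : Int) : ∀ fuel i,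
    i + fuel = nums.length →
    pvFind nums threshold ((List.range nums.length).map (pvAL nums))
      ((List.range nums.length).map (pvAR nums nums.length)) i fuel
      = pvGoB nums threshold i fuel := by
  intro fuel
  induction fuel with
  | zero => intro i _; rfl
  | succ fuel ih =>
    intro i hn
    have hi : i < nums.length := by omega
    have hLa : pvPropL nums i (pvLA nums i) := pvLA_prop nums i
    have hRa : pvPropR nums i (pvRA nums nums.length i) := pvRA_prop nums i hi
    set L := (List.range nums.length).map (pvAL nums) with hLdef
    set R := (List.range nums.length).map (pvAR nums nums.length) with hRdef
    have hL : L.getD i 0 = pvAL nums i := pvGetDMapRange _ _ i hi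
    have hR : R.getD i 0 = pvAR nums nums.length i := pvGetDMapRange _ _ i hi
    have hlen : R.getD i 0 - L.getD i 0 - 1
        = ((pvRA nums nums.length i : Int) - (pvLA nums i : Int) + 1) := by
      rw [hL, hR, pvAL_eq nums i, pvAR_eq nums i hi]
      ring
    have hlen1 : (1 : Int) ≤ R.getD i 0 - L.getD i 0 - 1 := by
      rw [hlen]
      have h1 := hLa.1
      have h2 := hRa.1
      omega
    have hstepA : pvFind nums threshold L R i (fuel + 1)
        = (if nums.getD i 0 > PySem.Int.floordiv threshold (R.getD i 0 - L.getD i 0 - 1) then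
            if nums.getD i 0 * (R.getD i 0 - L.getD i 0 - 1) > threshold then
              R.getD i 0 - L.getD i 0 - 1
            else pvFind nums threshold L R (i + 1) fuel
          else pvFind nums threshold L R (i + 1) fuel) := rfl
    have hstepB : pvGoB nums threshold i (fuel + 1)
        = (if nums.getD i 0 * ((pvScanR nums (nums.getD i 0) i : Int)
              - (pvScanL nums (nums.getD i 0) i : Int) + 1) > threshold then
            ((pvScanR nums (nums.getD i 0) i : Int) - (pvScanL nums (nums.getD i 0) i : Int) + 1)
          else pvGoB nums threshold (i + 1) fuel) := rfl
    rw [hstepA, hstepB, pvScanL_eq nums i, pvScanR_eq nums i hi, ← hlen]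
    by_cases hc : nums.getD i 0 * (R.getD i 0 - L.getD i 0 - 1) > threshold
    · rw [if_pos ((pvCondIff _ threshold _ hlen1).mpr hc), if_pos hc, if_pos hc]
    · rw [if_neg hc]
      by_cases hd : nums.getD i 0 > PySem.Int.floordiv threshold (R.getD i 0 - L.getD i 0 - 1)
      · rw [if_pos hd, if_neg hc, ih (i + 1) (by omega)]
      · rw [if_neg hd, if_neg hc, ih (i + 1) (by omega)]

theorem pvLeft_eq (nums : List Int) :
    pvLeftGo nums [] 0 nums.length = (List.range nums.length).map (pvAL nums) := by
  have h := pvLeftGo_spec nums nums.length 0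
  rw [pvSL_zero] at h
  rw [h, ← List.range_eq_range']

theorem pvRight_eq (nums : List Int) :
    (pvRightGo nums nums.length [] nums.length).reverse
      = (List.range nums.length).map (pvAR nums nums.length) := by
  have h := pvRightGo_spec nums nums.length nums.length (le_refl _)
  rw [pvSR_top] at h
  rw [h, List.map_reverse, List.reverse_reverse]

-- ===== VERDICT (by name: the statement is the Claim_ definition above) =====
theorem validSubarraySize_spec : Claim_equal_validSubarraySize := by
  intro nums threshold _
  unfold Spec_validSubarraySize validSubarraySize validSubarraySize_alt
  show pvFind nums threshold (pvLeftGo nums [] 0 nums.length)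
      ((pvRightGo nums nums.length [] nums.length).reverse) 0 nums.length
    = pvGoB nums threshold 0 nums.length
  rw [pvLeft_eq, pvRight_eq]
  exact pvFind_eq_goB nums threshold nums.length 0 (by omega)
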